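-- pv_equiv track=rewrite | github.com/askhari139/nTeamsProject | fig_3_4_codes/artificial.py | peripheral
-- ===== SOURCE A (Python) =====
-- def peripheral(mat): #find peripheral nodes in a network
--     per=0
--
--     for i in range(len(mat)):
--         checkin=0
--         checkout=0
--         for j in range(len(mat)):
--             if mat[i][j]!=0:
--                 checkout+=1
--
--             if mat[j][i]!=0:
--                 checkin+=1
--
--         if checkin==0 or checkout==0:
--             per+=1
--
--     return per
-- ===== SOURCE B (Python) =====
-- def peripheral(mat):  # sparse sweep: collect source/target index sets from nonzero entries, answer = n - |overlap|
--     n = len(mat)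
--     outs = set()
--     ins = set()
--     for i in range(n):
--         row = mat[i]
--         for j in range(n):
--             if row[j] != 0:
--                 outs.add(i)
--                 ins.add(j)
--     return n - len(outs & ins)
-- ===== Notes on version B (the rewrite author's own statement) =====
-- stated objective: alternative
-- what changed: Replaces A's per-node in/out counters (each node scanning its row and its column) by a single sweep over the matrix that collects the set of source indices and the set of target indices of nonzero entries, returning n - |outs & ins| as a set-intersection closed form; the column pass disappears.
import Mathlib
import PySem

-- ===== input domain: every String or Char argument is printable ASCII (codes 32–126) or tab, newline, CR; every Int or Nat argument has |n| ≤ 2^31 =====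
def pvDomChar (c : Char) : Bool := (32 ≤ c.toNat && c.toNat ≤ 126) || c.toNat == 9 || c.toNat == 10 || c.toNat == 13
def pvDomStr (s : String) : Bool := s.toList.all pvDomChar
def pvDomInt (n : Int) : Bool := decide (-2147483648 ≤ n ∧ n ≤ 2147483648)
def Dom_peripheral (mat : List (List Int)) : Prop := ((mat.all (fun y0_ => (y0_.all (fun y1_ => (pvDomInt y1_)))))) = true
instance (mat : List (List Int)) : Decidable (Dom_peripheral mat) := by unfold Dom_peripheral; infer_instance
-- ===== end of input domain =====

-- B replaces A's per-node in/out counters by one sweep over nonzero entries collecting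
-- source/target index sets, returning n - |outs & ins|; alternative decomposition, same asymptotic cost.
-- Matrix entry mat[i][j]; out-of-range access (Python IndexError on a short row) is
-- excluded by Pre_peripheral, so getD is exact here.
def pvEntry (mat : List (List Int)) (i j : Nat) : Int := (mat.getD i []).getD j 0

-- ===== PORT A =====
-- literal port: outer loop over i, inner loop over j maintaining (checkin, checkout), then per += 1 when either is 0
def peripheral (mat : List (List Int)) : Int :=
  let n := mat.length
  (List.range n).foldl (fun per i =>
    let c := (List.range n).foldl (fun (cc : Int × Int) j =>
      let cc := if pvEntry mat i j ≠ 0 then (cc.1, cc.2 + 1) else cc  -- checkout += 1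
      if pvEntry mat j i ≠ 0 then (cc.1 + 1, cc.2) else cc           -- checkin += 1
      ) ((0 : Int), (0 : Int))
    if c.1 = 0 ∨ c.2 = 0 then per + 1 else per) 0

-- ===== PORT B =====
-- literal port of Source B: one sweep building the two Python sets, then n - len(outs & ins)
def peripheral_alt (mat : List (List Int)) : Int :=
  let n := mat.length
  let p := (List.range n).foldl (fun (p : PySem.Set Nat × PySem.Set Nat) i =>
    (List.range n).foldl (fun (p : PySem.Set Nat × PySem.Set Nat) j =>
      if pvEntry mat i j ≠ 0 then (PySem.Set.add p.1 i, PySem.Set.add p.2 j) else p) p)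
    (PySem.Set.empty, PySem.Set.empty)
  (n : Int) - PySem.Set.len (PySem.Set.inter p.1 p.2)

-- ===== PRECONDITION & SPEC =====
-- Pre_ excludes exactly the matrices with a row shorter than len(mat): there A raises IndexError.
def Pre_peripheral (mat : List (List Int)) : Prop := ∀ row ∈ mat, mat.length ≤ row.length
instance (mat : List (List Int)) : Decidable (Pre_peripheral mat) := by unfold Pre_peripheral; infer_instance
def pvWitness_peripheral : List (List Int) := [[0, 1], [1, 0]]
def Spec_peripheral (mat : List (List Int)) (out : Int) : Prop := out = peripheral_alt mat
instance (mat : List (List Int)) (out : Int) : Decidable (Spec_peripheral mat out) := by unfold Spec_peripheral; infer_instance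

-- ===== CLAIM (what is proved, stated in full; the proofs are below) =====
def Claim_equal_peripheral : Prop := ∀ (mat : List (List Int)), Dom_peripheral mat → Pre_peripheral mat → Spec_peripheral mat (peripheral mat)

-- ===== LEMMAS AND PROOFS =====

-- A's inner loop computes the two counts
theorem inner_fold (mat : List (List Int)) (i : Nat) (l : List Nat) (a b : Int) :
    l.foldl (fun (cc : Int × Int) j =>
      let cc := if pvEntry mat i j ≠ 0 then (cc.1, cc.2 + 1) else cc
      if pvEntry mat j i ≠ 0 then (cc.1 + 1, cc.2) else cc) (a, b)
    = (a + l.countP (fun j => pvEntry mat j i ≠ 0),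
       b + l.countP (fun j => pvEntry mat i j ≠ 0)) := by
  induction l generalizing a b with
  | nil => simp
  | cons x xs ih =>
    rw [List.foldl_cons]
    by_cases h1 : pvEntry mat i x ≠ 0 <;> by_cases h2 : pvEntry mat x i ≠ 0
    · simp only [if_pos h1, if_pos h2]
      rw [ih]; simp [h1, h2]; constructor <;> ring
    · simp only [if_pos h1, if_neg h2]
      rw [ih]; simp [h1, h2]; ring
    · simp only [if_neg h1, if_pos h2]
      rw [ih]; simp [h1, h2]; ring
    · simp only [if_neg h1, if_neg h2]
      rw [ih]; simp [h1, h2]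

-- A's outer loop counts
theorem outer_fold (p : Nat → Prop) [DecidablePred p] (l : List Nat) (a : Int) :
    l.foldl (fun per i => if p i then per + 1 else per) a = a + l.countP (fun i => decide (p i)) := by
  induction l generalizing a with
  | nil => simp
  | cons x xs ih =>
    by_cases h : p x <;> simp [h, ih] <;> ring

-- membership in B's inner fold state
theorem mem_inner (mat : List (List Int)) (i : Nat) (l : List Nat)
    (p : PySem.Set Nat × PySem.Set Nat) (x : Nat) :
    (x ∈ (l.foldl (fun (p : PySem.Set Nat × PySem.Set Nat) j =>
        if pvEntry mat i j ≠ 0 then (PySem.Set.add p.1 i, PySem.Set.add p.2 j) else p) p).1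
      ↔ x ∈ p.1 ∨ (x = i ∧ ∃ j ∈ l, pvEntry mat i j ≠ 0)) ∧
    (x ∈ (l.foldl (fun (p : PySem.Set Nat × PySem.Set Nat) j =>
        if pvEntry mat i j ≠ 0 then (PySem.Set.add p.1 i, PySem.Set.add p.2 j) else p) p).2
      ↔ x ∈ p.2 ∨ (x ∈ l ∧ pvEntry mat i x ≠ 0)) := by
  induction l generalizing p with
  | nil => simp
  | cons y ys ih =>
    rw [List.foldl_cons]
    by_cases h : pvEntry mat i y ≠ 0
    · rw [if_pos h]
      constructor
      · refine ((ih _).1).trans ?_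
        constructor
        · rintro (hp | ⟨rfl, j, hj, hq⟩)
          · rcases (PySem.Set.mem_add _ _ _).1 hp with hp | rfl
            · exact Or.inl hp
            · exact Or.inr ⟨rfl, y, List.mem_cons_self, h⟩
          · exact Or.inr ⟨rfl, j, List.mem_cons_of_mem _ hj, hq⟩
        · rintro (hp | ⟨rfl, _⟩)
          · exact Or.inl ((PySem.Set.mem_add _ _ _).2 (Or.inl hp))
          · exact Or.inl ((PySem.Set.mem_add _ _ _).2 (Or.inr rfl))
      · refine ((ih _).2).trans ?_
        constructor
        · rintro (hp | ⟨hx, hq⟩)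
          · rcases (PySem.Set.mem_add _ _ _).1 hp with hp | rfl
            · exact Or.inl hp
            · exact Or.inr ⟨List.mem_cons_self, h⟩
          · exact Or.inr ⟨List.mem_cons_of_mem _ hx, hq⟩
        · rintro (hp | ⟨hx, hq⟩)
          · exact Or.inl ((PySem.Set.mem_add _ _ _).2 (Or.inl hp))
          · rcases List.mem_cons.1 hx with rfl | hx
            · exact Or.inl ((PySem.Set.mem_add _ _ _).2 (Or.inr rfl))
            · exact Or.inr ⟨hx, hq⟩
    · rw [if_neg h]
      constructor
      · refine ((ih _).1).trans ?_
        constructor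
        · rintro (hp | ⟨rfl, j, hj, hq⟩)
          · exact Or.inl hp
          · exact Or.inr ⟨rfl, j, List.mem_cons_of_mem _ hj, hq⟩
        · rintro (hp | ⟨rfl, j, hj, hq⟩)
          · exact Or.inl hp
          · rcases List.mem_cons.1 hj with rfl | hj
            · exact absurd hq h
            · exact Or.inr ⟨rfl, j, hj, hq⟩
      · refine ((ih _).2).trans ?_
        constructor
        · rintro (hp | ⟨hx, hq⟩)
          · exact Or.inl hp
          · exact Or.inr ⟨List.mem_cons_of_mem _ hx, hq⟩
        · rintro (hp | ⟨hx, hq⟩)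
          · exact Or.inl hp
          · rcases List.mem_cons.1 hx with rfl | hx
            · exact absurd hq h
            · exact Or.inr ⟨hx, hq⟩

-- nodup of B's inner fold state
theorem nodup_inner (mat : List (List Int)) (i : Nat) (l : List Nat)
    (p : PySem.Set Nat × PySem.Set Nat) (h1 : p.1.Nodup) (h2 : p.2.Nodup) :
    ((l.foldl (fun (p : PySem.Set Nat × PySem.Set Nat) j =>
        if pvEntry mat i j ≠ 0 then (PySem.Set.add p.1 i, PySem.Set.add p.2 j) else p) p).1.Nodup) ∧
    ((l.foldl (fun (p : PySem.Set Nat × PySem.Set Nat) j =>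
        if pvEntry mat i j ≠ 0 then (PySem.Set.add p.1 i, PySem.Set.add p.2 j) else p) p).2.Nodup) := by
  induction l generalizing p with
  | nil => exact ⟨h1, h2⟩
  | cons y ys ih =>
    rw [List.foldl_cons]
    by_cases h : pvEntry mat i y ≠ 0
    · rw [if_pos h]
      exact ih _ (PySem.Set.nodup_add _ _ h1) (PySem.Set.nodup_add _ _ h2)
    · rw [if_neg h]; exact ih _ h1 h2

-- membership in B's full fold state
theorem mem_outer (mat : List (List Int)) (lo li : List Nat) (x : Nat)
    (p : PySem.Set Nat × PySem.Set Nat) :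
    (x ∈ (lo.foldl (fun (p : PySem.Set Nat × PySem.Set Nat) i =>
        li.foldl (fun (p : PySem.Set Nat × PySem.Set Nat) j =>
          if pvEntry mat i j ≠ 0 then (PySem.Set.add p.1 i, PySem.Set.add p.2 j) else p) p) p).1
      ↔ x ∈ p.1 ∨ (x ∈ lo ∧ ∃ j ∈ li, pvEntry mat x j ≠ 0)) ∧
    (x ∈ (lo.foldl (fun (p : PySem.Set Nat × PySem.Set Nat) i =>
        li.foldl (fun (p : PySem.Set Nat × PySem.Set Nat) j =>
          if pvEntry mat i j ≠ 0 then (PySem.Set.add p.1 i, PySem.Set.add p.2 j) else p) p) p).2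
      ↔ x ∈ p.2 ∨ (x ∈ li ∧ ∃ i ∈ lo, pvEntry mat i x ≠ 0)) := by
  induction lo generalizing p with
  | nil => simp
  | cons y ys ih =>
    rw [List.foldl_cons]
    constructor
    · refine ((ih _).1).trans ?_
      rw [(mem_inner mat y li p x).1]
      constructor
      · rintro ((hp | ⟨rfl, j, hj, hq⟩) | ⟨hx, j, hj, hq⟩)
        · exact Or.inl hp
        · exact Or.inr ⟨List.mem_cons_self, j, hj, hq⟩
        · exact Or.inr ⟨List.mem_cons_of_mem _ hx, j, hj, hq⟩
      · rintro (hp | ⟨hx, j, hj, hq⟩)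
        · exact Or.inl (Or.inl hp)
        · rcases List.mem_cons.1 hx with rfl | hx
          · exact Or.inl (Or.inr ⟨rfl, j, hj, hq⟩)
          · exact Or.inr ⟨hx, j, hj, hq⟩
    · refine ((ih _).2).trans ?_
      rw [(mem_inner mat y li p x).2]
      constructor
      · rintro ((hp | ⟨hx, hq⟩) | ⟨hx, i, hi, hq⟩)
        · exact Or.inl hp
        · exact Or.inr ⟨hx, y, List.mem_cons_self, hq⟩
        · exact Or.inr ⟨hx, i, List.mem_cons_of_mem _ hi, hq⟩
      · rintro (hp | ⟨hx, i, hi, hq⟩)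
        · exact Or.inl (Or.inl hp)
        · rcases List.mem_cons.1 hi with rfl | hi
          · exact Or.inl (Or.inr ⟨hx, hq⟩)
          · exact Or.inr ⟨hx, i, hi, hq⟩

-- nodup of B's full fold state
theorem nodup_outer (mat : List (List Int)) (lo li : List Nat)
    (p : PySem.Set Nat × PySem.Set Nat) (h1 : p.1.Nodup) (h2 : p.2.Nodup) :
    ((lo.foldl (fun (p : PySem.Set Nat × PySem.Set Nat) i =>
        li.foldl (fun (p : PySem.Set Nat × PySem.Set Nat) j =>
          if pvEntry mat i j ≠ 0 then (PySem.Set.add p.1 i, PySem.Set.add p.2 j) else p) p) p).1.Nodup) ∧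
    ((lo.foldl (fun (p : PySem.Set Nat × PySem.Set Nat) i =>
        li.foldl (fun (p : PySem.Set Nat × PySem.Set Nat) j =>
          if pvEntry mat i j ≠ 0 then (PySem.Set.add p.1 i, PySem.Set.add p.2 j) else p) p) p).2.Nodup) := by
  induction lo generalizing p with
  | nil => exact ⟨h1, h2⟩
  | cons y ys ih =>
    rw [List.foldl_cons]
    exact ih _ (nodup_inner mat y li p h1 h2).1 (nodup_inner mat y li p h1 h2).2

-- a nodup list whose members are exactly {x < n : q x} has length countP q (range n)
theorem len_eq_countP (n : Nat) (s : List Nat) (hs : s.Nodup) (q : Nat → Bool)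
    (hmem : ∀ x, x ∈ s ↔ x < n ∧ q x = true) :
    s.length = (List.range n).countP q := by
  rw [List.countP_eq_length_filter]
  have hperm : s.Perm ((List.range n).filter q) :=
    (List.perm_ext_iff_of_nodup hs (List.Nodup.filter _ List.nodup_range)).2
      (fun x => by rw [hmem, List.mem_filter, List.mem_range])
  exact hperm.length_eq

-- ===== VERDICT (by name: the statement is the Claim_ definition above) =====
theorem peripheral_spec : Claim_equal_peripheral := by
  intro mat _ hpre
  unfold Spec_peripheral peripheral peripheral_alt
  simp only [inner_fold]
  rw [outer_fold]
  set n := mat.length with hn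
  set P := (List.range n).foldl (fun (p : PySem.Set Nat × PySem.Set Nat) i =>
    (List.range n).foldl (fun (p : PySem.Set Nat × PySem.Set Nat) j =>
      if pvEntry mat i j ≠ 0 then (PySem.Set.add p.1 i, PySem.Set.add p.2 j) else p) p)
    (PySem.Set.empty, PySem.Set.empty) with hP
  have hnod := nodup_outer mat (List.range n) (List.range n)
    (PySem.Set.empty, PySem.Set.empty) List.nodup_nil List.nodup_nil
  have hmem := fun x => mem_outer mat (List.range n) (List.range n) x
    (PySem.Set.empty, PySem.Set.empty)
  rw [← hP] at hnod
  have hmem1 : ∀ x, x ∈ P.1 ↔ x < n ∧ ∃ j < n, pvEntry mat x j ≠ 0 := by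
    intro x
    rw [hP, (hmem x).1]
    simp [PySem.Set.empty, List.mem_range]
  have hmem2 : ∀ x, x ∈ P.2 ↔ x < n ∧ ∃ i < n, pvEntry mat i x ≠ 0 := by
    intro x
    rw [hP, (hmem x).2]
    simp [PySem.Set.empty, List.mem_range]
  -- |outs & ins| = countP over range n of "has out and has in"
  have hinter : (PySem.Set.len (PySem.Set.inter P.1 P.2))
      = (List.range n).countP (fun i =>
          decide ((∃ j < n, pvEntry mat i j ≠ 0) ∧ ∃ j < n, pvEntry mat j i ≠ 0)) := by
    have hlen : (PySem.Set.inter P.1 P.2).length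
        = (List.range n).countP (fun i =>
            decide ((∃ j < n, pvEntry mat i j ≠ 0) ∧ ∃ j < n, pvEntry mat j i ≠ 0)) := by
      refine len_eq_countP n _ (PySem.Set.nodup_inter _ _ hnod.1) _ (fun x => ?_)
      rw [PySem.Set.mem_inter, hmem1, hmem2]
      simp only [decide_eq_true_iff]
      tauto
    simp [PySem.Set.len, hlen]
  rw [hinter]
  -- A's per-node test is the complement of B's per-node membership
  have hcong : (List.range n).countP (fun i =>
        decide ((0:Int) + ((List.range n).countP (fun j => pvEntry mat j i ≠ 0) : Int) = 0 ∨
                (0:Int) + ((List.range n).countP (fun j => pvEntry mat i j ≠ 0) : Int) = 0))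
      = (List.range n).countP (fun i =>
        !(decide ((∃ j < n, pvEntry mat i j ≠ 0) ∧ ∃ j < n, pvEntry mat j i ≠ 0))) := by
    refine List.countP_congr (fun i _ => ?_)
    have h1 : ((0:Int) + ((List.range n).countP (fun j => pvEntry mat j i ≠ 0) : Int) = 0
        ↔ ¬ ∃ j < n, pvEntry mat j i ≠ 0) := by
      rw [zero_add, Nat.cast_eq_zero, List.countP_eq_zero]
      simp
    have h2 : ((0:Int) + ((List.range n).countP (fun j => pvEntry mat i j ≠ 0) : Int) = 0
        ↔ ¬ ∃ j < n, pvEntry mat i j ≠ 0) := by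
      rw [zero_add, Nat.cast_eq_zero, List.countP_eq_zero]
      simp
    simp only [← decide_not, decide_eq_true_iff]
    rw [h1, h2, not_and_or, or_comm]
  rw [zero_add, hcong]
  -- counting a predicate and its negation partitions range n
  have hsplit := List.length_eq_countP_add_countP
    (fun i => decide ((∃ j < n, pvEntry mat i j ≠ 0) ∧ ∃ j < n, pvEntry mat j i ≠ 0))
    (l := List.range n)
  rw [List.length_range] at hsplit
  have h3 : (List.range n).countP (fun i =>
        !(decide ((∃ j < n, pvEntry mat i j ≠ 0) ∧ ∃ j < n, pvEntry mat j i ≠ 0)))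
      = (List.range n).countP (fun a =>
        decide (¬ decide ((∃ j < n, pvEntry mat a j ≠ 0) ∧ ∃ j < n, pvEntry mat j a ≠ 0) = true)) :=
    List.countP_congr (fun a _ => by simp only [decide_not, Bool.decide_eq_true])
  omega
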